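-- pv_equiv track=rewrite | github.com/zachary-andrews/Codefoo | Decode_String/solution.py | check_nested
-- ===== SOURCE A (Python) =====
-- def check_nested(code: str) -> str:
--     open = False
--     for c in code:
--         if c == '[' and open:
--             return True
--         elif c == '[' and not open:
--             open = True
--         elif c == ']' and open:
--             open = False
--     return False
-- ===== SOURCE B (Python) =====
-- def check_nested(code: str) -> str:
--     return any(seg.count('[') >= 2 for seg in code.split(']'))
-- ===== Notes on version B (the rewrite author's own statement) =====
-- stated objective: simpler
-- what changed: Replaced the explicit single-pass open-flag state machine with a declarative split-then-count: split the string on the closing bracket and report whether any segment contains at least two opening brackets.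
import Mathlib
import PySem

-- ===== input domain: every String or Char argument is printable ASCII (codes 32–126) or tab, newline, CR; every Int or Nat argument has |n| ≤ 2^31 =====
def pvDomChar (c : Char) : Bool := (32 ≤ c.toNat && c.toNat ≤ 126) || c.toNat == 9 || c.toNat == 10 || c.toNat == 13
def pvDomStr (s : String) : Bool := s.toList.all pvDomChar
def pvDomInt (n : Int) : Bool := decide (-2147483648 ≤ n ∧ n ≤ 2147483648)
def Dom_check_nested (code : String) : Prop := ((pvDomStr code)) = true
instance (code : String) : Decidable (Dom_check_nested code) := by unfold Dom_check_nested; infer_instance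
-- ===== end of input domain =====

-- B replaces A's open-flag state machine with split-on-']'-then-count (simpler, same O(n) cost).

-- ===== PORT A =====
-- the 'for c in code' loop with the 'open' flag and the early 'return True'
def checkNestedLoop : List Char → Bool → Bool
  | [], _ => false
  | c :: rest, opn =>
    if c == '[' && opn then true
    else if c == '[' && !opn then checkNestedLoop rest true
    else if c == ']' && opn then checkNestedLoop rest false
    else checkNestedLoop rest opn

def check_nested (code : String) : Bool :=
  checkNestedLoop code.toList false

-- ===== PORT B =====
-- Source B: any(seg.count('[') >= 2 for seg in code.split(']'))
-- code.split(']') (single-char separator) is List.splitOn ']' on the code points;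
-- seg.count('[') (single-char needle) is List.count '['.
def check_nested_alt (code : String) : Bool :=
  (code.toList.splitOn ']').any (fun seg => 2 ≤ seg.count '[')

-- ===== PRECONDITION & SPEC =====
def Spec_check_nested (code : String) (out : Bool) : Prop := out = check_nested_alt code
instance (code : String) (out : Bool) : Decidable (Spec_check_nested code out) := by unfold Spec_check_nested; infer_instance

-- ===== CLAIM (what is proved, stated in full; the proofs are below) =====
def Claim_equal_check_nested : Prop := ∀ (code : String), Dom_check_nested code → Spec_check_nested code (check_nested code)

-- ===== LEMMAS AND PROOFS =====

-- Loop/split correspondence: the pending '[' seen while 'opn' is an extra credit of 1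
-- towards the 2-'['-in-one-segment condition on the current segment.
theorem checkNestedLoop_splitOn (l : List Char) (opn : Bool) :
    checkNestedLoop l opn =
      (decide (2 ≤ (l.splitOn ']').headI.count '[' + (if opn then 1 else 0))
        || (l.splitOn ']').tail.any (fun seg => 2 ≤ seg.count '[')) := by
  induction l generalizing opn with
  | nil =>
    cases opn <;> simp [checkNestedLoop, List.splitOn]
  | cons c rest ih =>
    obtain ⟨h, t, e⟩ := List.exists_cons_of_ne_nil (List.splitOnP_ne_nil (· == ']') rest)
    by_cases hc : c = ']'
    · subst hc
      cases opn <;>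
        simp [checkNestedLoop, List.splitOn, ih, e, List.any_cons]
    · by_cases hb : c = '['
      · subst hb
        cases opn <;>
          simp [checkNestedLoop, List.splitOn, ih, e]
      · have : ¬ (c == ']') = true := by simp [hc]
        cases opn <;>
          simp [checkNestedLoop, hb, hc, List.splitOn, ih, e]

-- ===== VERDICT (by name: the statement is the Claim_ definition above) =====
theorem check_nested_spec : Claim_equal_check_nested := by
  intro code _
  unfold Spec_check_nested check_nested check_nested_alt
  rw [checkNestedLoop_splitOn]
  obtain ⟨h, t, e⟩ := List.exists_cons_of_ne_nil (List.splitOnP_ne_nil (· == ']') code.toList)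
  simp [List.splitOn, e, List.any_cons]
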